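-- pv_equiv track=rewrite | github.com/ArpanaG123/Data-Structures-Algorithms | Bit-Manipulation/copy-set-bit-in-range.py | copySetBit
-- ===== SOURCE A (Python) =====
-- def copySetBit(x,y,l,r):
--     if l < 1 or r > 32:
--         return x
--
--     for i in range(l,r+1):
--         bit_mask = 1 <<(i-1)
--
--         if bit_mask & y != 0:
--             x = x | bit_mask
--     return x
-- ===== SOURCE B (Python) =====
-- def _range_mask(l, r):
--     # mask with bits l-1 .. r-1 set
--     return (1 << r) - (1 << (l - 1))
--
-- def copySetBit(x, y, l, r):
--     if 1 <= l <= r <= 32: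
--         return (y & _range_mask(l, r)) | x
--     return x
-- ===== Notes on version B (the rewrite author's own statement) =====
-- stated objective: simpler
-- what changed: Replaces the per-bit loop over positions l..r with one closed-form range mask ((1<<r)-(1<<(l-1))) built by a helper and a single (y & mask) | x, guarded by one combined condition 1 <= l <= r <= 32 instead of the loop and the original two-sided guard.
import Mathlib
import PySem

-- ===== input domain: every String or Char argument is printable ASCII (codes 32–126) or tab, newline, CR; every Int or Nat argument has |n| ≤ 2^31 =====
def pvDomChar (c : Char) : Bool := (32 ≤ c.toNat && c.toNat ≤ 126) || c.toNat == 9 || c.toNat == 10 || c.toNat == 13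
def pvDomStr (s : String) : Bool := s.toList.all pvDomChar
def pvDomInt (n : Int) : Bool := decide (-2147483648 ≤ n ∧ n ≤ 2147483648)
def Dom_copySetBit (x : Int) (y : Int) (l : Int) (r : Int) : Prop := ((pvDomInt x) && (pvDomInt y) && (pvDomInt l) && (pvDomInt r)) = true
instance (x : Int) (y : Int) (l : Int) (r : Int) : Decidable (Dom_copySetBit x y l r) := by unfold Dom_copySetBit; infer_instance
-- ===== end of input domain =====

-- B replaces A's per-bit loop over positions l..r by one closed-form range mask (built by a helper) and a single OR, behind one combined guard (simpler, no loop).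

-- ===== PORT A =====
def copySetBit (x : Int) (y : Int) (l : Int) (r : Int) : Int :=
  if l < 1 ∨ r > 32 then x
  else
    (PySem.List.pyRange l (r + 1) 1).foldl
      (fun x i =>
        let bit_mask : Int := 1 <<< (i - 1).toNat   -- i ≥ l ≥ 1 inside the range, so i-1 ≥ 0 and the shift is Python-exact
        if PySem.Int.band bit_mask y ≠ 0 then PySem.Int.bor x bit_mask else x) x

-- ===== PORT B =====
-- helper: mask with bits l-1 .. r-1 set (1 ≤ l ≤ r at the call site, so the shifts are Python-exact)
def pvRangeMask (l : Int) (r : Int) : Int :=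
  ((1 <<< r.toNat : Nat) : Int) - ((1 <<< (l - 1).toNat : Nat) : Int)

def copySetBit_alt (x : Int) (y : Int) (l : Int) (r : Int) : Int :=
  if 1 ≤ l ∧ l ≤ r ∧ r ≤ 32 then
    PySem.Int.bor (PySem.Int.band y (pvRangeMask l r)) x
  else x

-- ===== PRECONDITION & SPEC =====
def Spec_copySetBit (x : Int) (y : Int) (l : Int) (r : Int) (out : Int) : Prop := out = copySetBit_alt x y l r
instance (x : Int) (y : Int) (l : Int) (r : Int) (out : Int) : Decidable (Spec_copySetBit x y l r out) := by unfold Spec_copySetBit; infer_instance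

-- ===== CLAIM (what is proved, stated in full; the proofs are below) =====
def Claim_equal_copySetBit : Prop := ∀ (x : Int) (y : Int) (l : Int) (r : Int), Dom_copySetBit x y l r → Spec_copySetBit x y l r (copySetBit x y l r)

-- ===== LEMMAS AND PROOFS =====
theorem pv_or_eq_add (a : Nat) : ∀ b, a &&& b = 0 → a ||| b = a + b := by
  induction a using Nat.strong_induction_on with
  | _ a ih =>
    intro b h
    rcases Nat.eq_zero_or_pos a with ha | ha
    · simp [ha]
    · have hdiv : (a / 2) &&& (b / 2) = 0 := by
        have := Nat.and_div_two_pow (a := a) (b := b) (n := 1)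
        simpa [h, pow_one] using this.symm
      have hmod : (a % 2) &&& (b % 2) = 0 := by
        have := Nat.and_mod_two_pow (a := a) (b := b) (n := 1)
        simpa [h, pow_one] using this.symm
      have h1 := Nat.or_div_two_pow (a := a) (b := b) (n := 1)
      have h2 := Nat.or_mod_two_pow (a := a) (b := b) (n := 1)
      simp only [pow_one] at h1 h2
      have hIH := ih (a / 2) (Nat.div_lt_self ha (by norm_num)) (b / 2) hdiv
      have hmod' : (a % 2) ||| (b % 2) = a % 2 + b % 2 := by
        have h4 : a % 2 < 2 := Nat.mod_lt _ (by norm_num)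
        have h5 : b % 2 < 2 := Nat.mod_lt _ (by norm_num)
        interval_cases ha' : a % 2 <;> interval_cases hb' : b % 2 <;> simp_all
      omega

theorem pv_sub_and_eq_ldiff (m n : Nat) : m - (m &&& n) = m.ldiff n := by
  have hand : (m &&& n) &&& m.ldiff n = 0 := by
    apply Nat.eq_of_testBit_eq
    intro i
    simp only [Nat.testBit_and, Nat.testBit_ldiff, Nat.zero_testBit]
    cases m.testBit i <;> cases n.testBit i <;> rfl
  have hor : (m &&& n) ||| m.ldiff n = m := by
    apply Nat.eq_of_testBit_eq
    intro i
    simp only [Nat.testBit_or, Nat.testBit_and, Nat.testBit_ldiff]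
    cases m.testBit i <;> cases n.testBit i <;> rfl
  have := pv_or_eq_add (m &&& n) (m.ldiff n) hand
  omega

theorem pv_band_eq_land (a b : Int) : PySem.Int.band a b = Int.land a b := by
  rcases a with m | m <;> rcases b with n | n <;>
    simp [PySem.Int.band, Int.land, Int.negSucc_eq, ← pv_sub_and_eq_ldiff] <;> omega

theorem pv_bor_eq_lor (a b : Int) : PySem.Int.bor a b = Int.lor a b := by
  rcases a with m | m <;> rcases b with n | n <;>
    simp [PySem.Int.bor, Int.lor, Int.negSucc_eq, ← pv_sub_and_eq_ldiff] <;> omega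

theorem pv_int_eq_of_testBit_eq (a b : Int) (h : ∀ k, a.testBit k = b.testBit k) : a = b := by
  rcases a with m | m <;> rcases b with n | n
  · exact congrArg Int.ofNat (Nat.eq_of_testBit_eq h)
  · exfalso
    have hk := h (m + n)
    have h1 : m.testBit (m + n) = false :=
      Nat.testBit_eq_false_of_lt (lt_of_le_of_lt (Nat.le_add_right m n)
        (Nat.lt_of_lt_of_le Nat.lt_two_pow_self (Nat.pow_le_pow_right (by norm_num) le_rfl)))
    have h2 : n.testBit (m + n) = false :=
      Nat.testBit_eq_false_of_lt (lt_of_le_of_lt (Nat.le_add_left n m) Nat.lt_two_pow_self)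
    simp [Int.testBit, h1, h2] at hk
  · exfalso
    have hk := h (m + n)
    have h1 : m.testBit (m + n) = false :=
      Nat.testBit_eq_false_of_lt (lt_of_le_of_lt (Nat.le_add_right m n) Nat.lt_two_pow_self)
    have h2 : n.testBit (m + n) = false :=
      Nat.testBit_eq_false_of_lt (lt_of_le_of_lt (Nat.le_add_left n m) Nat.lt_two_pow_self)
    simp [Int.testBit, h1, h2] at hk
  · have : m = n := Nat.eq_of_testBit_eq (fun i => by
      have := h i; simpa [Int.testBit] using this)
    exact congrArg Int.negSucc this

theorem pv_lor_comm (a b : Int) : Int.lor a b = Int.lor b a := by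
  apply pv_int_eq_of_testBit_eq
  intro k
  simp [Int.testBit_lor, Bool.or_comm]

def pvMask (a n : Nat) : Int := (((2 ^ n - 1) <<< a : Nat) : Int)

theorem pv_testBit_natCast (m : Nat) (k : Nat) : (Int.testBit (m : Int) k) = m.testBit k := rfl

theorem pv_testBit_zero (k : Nat) : Int.testBit 0 k = false := by
  rw [show (0 : Int) = ((0 : Nat) : Int) from rfl, pv_testBit_natCast, Nat.zero_testBit]

theorem pv_land_zero (y : Int) : Int.land y 0 = 0 := by
  apply pv_int_eq_of_testBit_eq
  intro k
  rw [Int.testBit_land, pv_testBit_zero, Bool.and_false]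

theorem pv_lor_zero (x : Int) : Int.lor x 0 = x := by
  apply pv_int_eq_of_testBit_eq
  intro k
  rw [Int.testBit_lor, pv_testBit_zero, Bool.or_false]

theorem pv_mask_testBit (a n k : Nat) : (pvMask a n).testBit k = decide (a ≤ k ∧ k < a + n) := by
  rw [pvMask, pv_testBit_natCast, Nat.testBit_shiftLeft, Nat.testBit_two_pow_sub_one]
  by_cases h1 : a ≤ k
  · have h2 : (k - a < n) ↔ (k < a + n) := by omega
    simp [h1, h2, GE.ge]
  · simp [GE.ge, h1]

theorem pv_two_pow_testBit (j k : Nat) : ((2 : Int) ^ j).testBit k = decide (j = k) := by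
  have h : ((2 : Int) ^ j) = ((2 ^ j : Nat) : Int) := by push_cast; ring
  rw [h, pv_testBit_natCast, Nat.testBit_two_pow]

theorem pv_land_two_pow (y : Int) (j : Nat) :
    Int.land ((2 : Int) ^ j) y = if y.testBit j then ((2 : Int) ^ j) else 0 := by
  apply pv_int_eq_of_testBit_eq
  intro k
  rw [Int.testBit_land, pv_two_pow_testBit]
  by_cases h : y.testBit j = true
  · rw [if_pos h]
    by_cases hk : j = k
    · subst hk; simp [pv_two_pow_testBit, h]
    · simp [pv_two_pow_testBit, hk]
  · rw [if_neg h, pv_testBit_zero]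
    by_cases hk : j = k
    · subst hk
      simp only [decide_true, Bool.true_and]
      simpa using h
    · simp [hk]

theorem pv_loop (y : Int) (a : Nat) : ∀ (n : Nat) (x : Int),
    (List.range n).foldl (fun z k =>
      if PySem.Int.band ((2 : Int) ^ (a + k)) y ≠ 0 then PySem.Int.bor z ((2 : Int) ^ (a + k)) else z) x
    = Int.lor x (Int.land y (pvMask a n)) := by
  intro n
  induction n with
  | zero =>
    intro x
    have hm : pvMask a 0 = 0 := by simp [pvMask]
    rw [hm, pv_land_zero, pv_lor_zero]
    rfl
  | succ n ih =>
    intro x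
    rw [List.range_succ, List.foldl_append, ih]
    simp only [List.foldl_cons, List.foldl_nil, pv_band_eq_land, pv_bor_eq_lor, pv_land_two_pow]
    by_cases h : y.testBit (a + n) = true
    · have hne : ((2 : Int) ^ (a + n)) ≠ 0 := by positivity
      rw [if_pos h, if_pos hne]
      apply pv_int_eq_of_testBit_eq
      intro k
      simp only [Int.testBit_lor, Int.testBit_land, pv_mask_testBit, pv_two_pow_testBit]
      by_cases hk : k = a + n
      · subst hk
        simp [h]
      · have hiff : (a ≤ k ∧ k < a + n) ↔ (a ≤ k ∧ k < a + (n + 1)) := by omega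
        simp [hiff, (show ¬ (a + n = k) by omega)]
    · rw [if_neg h]
      have h0 : ¬ ((0 : Int) ≠ 0) := by simp
      rw [if_neg h0]
      apply pv_int_eq_of_testBit_eq
      intro k
      simp only [Int.testBit_lor, Int.testBit_land, pv_mask_testBit]
      by_cases hk : k = a + n
      · subst hk
        simp [Bool.not_eq_true] at h; simp [h]
      · have hiff : (a ≤ k ∧ k < a + n) ↔ (a ≤ k ∧ k < a + (n + 1)) := by omega
        simp [hiff]

theorem pv_copySetBit_eq (x y l r : Int) : copySetBit x y l r = copySetBit_alt x y l r := by
  unfold copySetBit copySetBit_alt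
  by_cases hb : 1 ≤ l ∧ l ≤ r ∧ r ≤ 32
  · obtain ⟨hl, hlr, hr⟩ := hb
    rw [if_neg (by omega : ¬ (l < 1 ∨ r > 32)), if_pos (show 1 ≤ l ∧ l ≤ r ∧ r ≤ 32 from ⟨hl, hlr, hr⟩)]
    have hrn : r.toNat = (l - 1).toNat + (r + 1 - l).toNat := by omega
    rw [PySem.List.pyRange_one, List.foldl_map]
    have hfun : (fun (z : Int) (k : Nat) =>
        (fun (x : Int) (i : Int) =>
          let bit_mask : Int := 1 <<< (i - 1).toNat
          if PySem.Int.band bit_mask y ≠ 0 then PySem.Int.bor x bit_mask else x) z (l + (k : Int)))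
        = (fun (z : Int) (k : Nat) =>
          if PySem.Int.band ((2 : Int) ^ ((l - 1).toNat + k)) y ≠ 0 then
            PySem.Int.bor z ((2 : Int) ^ ((l - 1).toNat + k)) else z) := by
      funext z k
      have h1 : (l + (k : Int) - 1).toNat = (l - 1).toNat + k := by omega
      simp only [h1, Nat.shiftLeft_eq, one_mul, Nat.cast_pow, Nat.cast_ofNat]
    rw [hfun, pv_loop y ((l - 1).toNat) ((r + 1 - l).toNat) x]
    have hmask : pvRangeMask l r = pvMask ((l - 1).toNat) ((r + 1 - l).toNat) := by
      rw [pvRangeMask, pvMask, Nat.one_shiftLeft, Nat.one_shiftLeft, Nat.shiftLeft_eq]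
      push_cast [Nat.one_le_two_pow]
      rw [hrn, pow_add]
      ring
    rw [hmask, pv_band_eq_land, pv_bor_eq_lor, pv_lor_comm]
  · rw [if_neg hb]
    by_cases hg : l < 1 ∨ r > 32
    · rw [if_pos hg]
    · rw [if_neg hg]
      push Not at hg
      have hlr : r < l := by omega
      have hemp : PySem.List.pyRange l (r + 1) 1 = [] := by
        rw [PySem.List.pyRange_one]
        have h0 : (r + 1 - l).toNat = 0 := by omega
        rw [h0]
        rfl
      rw [hemp]
      rfl

-- ===== VERDICT (by name: the statement is the Claim_ definition above) =====
theorem copySetBit_spec : Claim_equal_copySetBit := by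
  intro x y l r _
  exact pv_copySetBit_eq x y l r
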